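-- pv_equiv track=rewrite | github.com/tjysdsg/MMML-Fall22 | data_analysis/webqa_stat.py | get_topic_overlap
-- ===== SOURCE A (Python) =====
-- def get_topic_overlap(train_topic_count, val_topic_count):
--     train_topic = set(train_topic_count.keys())
--     val_topic = set(val_topic_count.keys())
--     shared_topic = train_topic.intersection(val_topic)
--     train_unique_topic = train_topic - shared_topic
--     val_unique_topic = val_topic - shared_topic
--
--     unique_val_topic_sample_num = 0
--     unique_train_topic_sample_num = 0
--     for topic in val_unique_topic:
--         unique_val_topic_sample_num += val_topic_count[topic]
--
--     for topic in train_unique_topic: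
--         unique_train_topic_sample_num += train_topic_count[topic]
--
--     return len(shared_topic), \
--            len(train_unique_topic), len(val_unique_topic), \
--            unique_train_topic_sample_num, unique_val_topic_sample_num
-- ===== SOURCE B (Python) =====
-- def get_topic_overlap(train_topic_count, val_topic_count):
--     shared = 0
--     train_unique = 0
--     val_unique = 0
--     train_unique_sum = 0
--     val_unique_sum = 0
--     for topic, n in train_topic_count.items():
--         if topic in val_topic_count:
--             shared += 1
--         else:
--             train_unique += 1
--             train_unique_sum += n
--     for topic, n in val_topic_count.items():
--         if topic not in train_topic_count:
--             val_unique += 1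
--             val_unique_sum += n
--     return shared, train_unique, val_unique, train_unique_sum, val_unique_sum
-- ===== Notes on version B (the rewrite author's own statement) =====
-- stated objective: simpler
-- what changed: Replaces the set-intersection/difference construction and the two separate summation loops by a single branching pass over each dict's items that classifies every entry and accumulates counts and sums at once.
import Mathlib
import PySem

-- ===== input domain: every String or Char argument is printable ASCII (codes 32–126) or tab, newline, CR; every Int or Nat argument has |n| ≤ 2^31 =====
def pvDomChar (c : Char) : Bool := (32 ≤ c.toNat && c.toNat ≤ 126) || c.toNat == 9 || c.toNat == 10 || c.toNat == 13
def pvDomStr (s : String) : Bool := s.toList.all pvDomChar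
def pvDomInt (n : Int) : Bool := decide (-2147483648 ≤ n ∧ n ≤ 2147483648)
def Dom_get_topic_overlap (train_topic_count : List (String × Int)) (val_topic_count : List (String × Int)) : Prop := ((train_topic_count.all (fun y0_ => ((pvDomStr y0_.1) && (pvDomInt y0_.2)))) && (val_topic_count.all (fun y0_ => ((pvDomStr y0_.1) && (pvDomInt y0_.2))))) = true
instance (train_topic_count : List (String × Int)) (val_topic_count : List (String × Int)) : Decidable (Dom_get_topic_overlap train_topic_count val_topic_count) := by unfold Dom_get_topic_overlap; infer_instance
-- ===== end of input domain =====

-- B replaces A's set-intersection/difference construction and separate summation loops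
-- by one branching pass over each dict's items (objective: simpler).

-- ===== PORT A =====
-- A consumes its Python sets only to count and to sum, so the unmodelled set
-- iteration order cannot affect the result; v[topic] is ported as getD (exact here:
-- the key is always present at that lookup).
def get_topic_overlap (train_topic_count : List (String × Int)) (val_topic_count : List (String × Int)) : Int × Int × Int × Int × Int :=
  let td := PySem.Dict.mk train_topic_count
  let vd := PySem.Dict.mk val_topic_count
  let train_topic := PySem.Set.ofList td.keys
  let val_topic := PySem.Set.ofList vd.keys
  let shared_topic := PySem.Set.inter train_topic val_topic
  let train_unique_topic := PySem.Set.diff train_topic shared_topic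
  let val_unique_topic := PySem.Set.diff val_topic shared_topic
  let unique_val_topic_sample_num := val_unique_topic.foldl (fun acc topic => acc + vd.getD topic 0) 0
  let unique_train_topic_sample_num := train_unique_topic.foldl (fun acc topic => acc + td.getD topic 0) 0
  (shared_topic.len, train_unique_topic.len, val_unique_topic.len,
   unique_train_topic_sample_num, unique_val_topic_sample_num)

def get_topic_overlap_alt (train_topic_count : List (String × Int)) (val_topic_count : List (String × Int)) : Int × Int × Int × Int × Int :=
  let td := PySem.Dict.mk train_topic_count
  let vd := PySem.Dict.mk val_topic_count
  let s1 : Int × Int × Int :=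
    train_topic_count.foldl
      (fun acc kv => if vd.contains kv.1 then (acc.1 + 1, acc.2.1, acc.2.2)
                     else (acc.1, acc.2.1 + 1, acc.2.2 + kv.2)) (0, 0, 0)
  let s2 : Int × Int :=
    val_topic_count.foldl
      (fun acc kv => if td.contains kv.1 then acc else (acc.1 + 1, acc.2 + kv.2)) (0, 0)
  (s1.1, s1.2.1, s2.1, s1.2.2, s2.2)


-- ===== PRECONDITION & SPEC =====
-- Pre_ only states that each association list represents a Python dict (pairwise
-- distinct keys); every input the Python function receives satisfies it.
def Pre_get_topic_overlap (train_topic_count : List (String × Int)) (val_topic_count : List (String × Int)) : Prop :=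
  (train_topic_count.map Prod.fst).Nodup ∧ (val_topic_count.map Prod.fst).Nodup
instance (train_topic_count : List (String × Int)) (val_topic_count : List (String × Int)) : Decidable (Pre_get_topic_overlap train_topic_count val_topic_count) := by unfold Pre_get_topic_overlap; infer_instance
def pvWitness_get_topic_overlap : (List (String × Int)) × (List (String × Int)) :=
  ([("a", 1), ("b", 2)], [("b", 3), ("c", 4)])

def Spec_get_topic_overlap (train_topic_count : List (String × Int)) (val_topic_count : List (String × Int)) (out : Int × Int × Int × Int × Int) : Prop := out = get_topic_overlap_alt train_topic_count val_topic_count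
instance (train_topic_count : List (String × Int)) (val_topic_count : List (String × Int)) (out : Int × Int × Int × Int × Int) : Decidable (Spec_get_topic_overlap train_topic_count val_topic_count out) := by unfold Spec_get_topic_overlap; infer_instance

-- ===== CLAIM (what is proved, stated in full; the proofs are below) =====
def Claim_equal_get_topic_overlap : Prop := ∀ (train_topic_count : List (String × Int)) (val_topic_count : List (String × Int)), Dom_get_topic_overlap train_topic_count val_topic_count → Pre_get_topic_overlap train_topic_count val_topic_count → Spec_get_topic_overlap train_topic_count val_topic_count (get_topic_overlap train_topic_count val_topic_count)

-- ===== LEMMAS AND PROOFS =====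

theorem foldB_train (t : List (String × Int)) (q : String → Bool) (a b c : Int) :
    t.foldl (fun acc kv => if q kv.1 then (acc.1 + 1, acc.2.1, acc.2.2)
                           else (acc.1, acc.2.1 + 1, acc.2.2 + kv.2)) (a, b, c)
    = (a + ((t.filter (fun kv => q kv.1)).length : Int),
       b + ((t.filter (fun kv => !q kv.1)).length : Int),
       c + ((t.filter (fun kv => !q kv.1)).map Prod.snd).sum) := by
  induction t generalizing a b c with
  | nil => simp
  | cons kv rest ih =>
    by_cases h : q kv.1 = true
    · simp [h, ih]; ring_nf
    · simp [h, ih]; ring_nf; exact ⟨trivial, trivial⟩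

theorem foldB_val (v : List (String × Int)) (q : String → Bool) (a b : Int) :
    v.foldl (fun acc kv => if q kv.1 then acc else (acc.1 + 1, acc.2 + kv.2)) (a, b)
    = (a + ((v.filter (fun kv => !q kv.1)).length : Int),
       b + ((v.filter (fun kv => !q kv.1)).map Prod.snd).sum) := by
  induction v generalizing a b with
  | nil => simp
  | cons kv rest ih =>
    by_cases h : q kv.1 = true
    · simp [h, ih]
    · simp [h, ih]; ring_nf; exact ⟨trivial, trivial⟩

theorem map_getD (t : List (String × Int)) (h : (t.map Prod.fst).Nodup) (p : String → Bool) :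
    ((t.map Prod.fst).filter p).map (fun k => (PySem.Dict.mk t).getD k 0)
    = (t.filter (fun kv => p kv.1)).map Prod.snd := by
  induction t with
  | nil => simp
  | cons kv rest ih =>
    simp only [List.map_cons, List.nodup_cons] at h
    have hne : ∀ k ∈ (rest.map Prod.fst).filter p, (PySem.Dict.mk (kv :: rest)).getD k 0 = (PySem.Dict.mk rest).getD k 0 := by
      intro k hk
      have hk' : k ∈ rest.map Prod.fst := List.mem_of_mem_filter hk
      have hb : (kv.1 == k) = false := by
        rw [beq_eq_false_iff_ne]
        intro he; exact h.1 (he ▸ hk')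
      simp [PySem.Dict.getD, PySem.Dict.get?, List.find?, hb]
    by_cases hp : p kv.1 = true <;>
      simp only [List.map_cons, List.filter_cons, hp, if_true, if_false, Bool.false_eq_true] <;>
      rw [List.map_congr_left hne, ih h.2]
    simp [PySem.Dict.getD, PySem.Dict.get?, List.find?]

theorem contains_mk_eq (v : List (String × Int)) (k : String) :
    (PySem.Dict.mk v).contains k = (v.map Prod.fst).contains k := by
  simp [PySem.Dict.contains, List.any_eq, List.mem_map]

theorem main (t v : List (String × Int)) (ht : (t.map Prod.fst).Nodup) (hv : (v.map Prod.fst).Nodup) :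
    get_topic_overlap t v = get_topic_overlap_alt t v := by
  have hQ : ∀ k, (PySem.Dict.mk v).contains k = (v.map Prod.fst).contains k := contains_mk_eq v
  have hP : ∀ k, (PySem.Dict.mk t).contains k = (t.map Prod.fst).contains k := contains_mk_eq t
  unfold get_topic_overlap get_topic_overlap_alt
  simp only [PySem.Dict.keys, PySem.Set.inter, PySem.Set.diff, PySem.Set.len, PySem.Set.contains]
  have hkt : (PySem.Dict.mk t).items.map (fun x => x.1) = t.map Prod.fst := rfl
  have hkv : (PySem.Dict.mk v).items.map (fun x => x.1) = v.map Prod.fst := rfl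
  rw [hkt, hkv, PySem.Set.ofList_eq_self_of_nodup _ ht, PySem.Set.ofList_eq_self_of_nodup _ hv]
  set tk := t.map Prod.fst with htk
  set vk := v.map Prod.fst with hvk
  have h2 : tk.filter (fun x => !(tk.filter (fun y => vk.contains y)).contains x)
      = tk.filter (fun x => !vk.contains x) := by
    apply List.filter_congr; intro x hx; simp [List.mem_filter, hx]
  have h3 : vk.filter (fun x => !(tk.filter (fun y => vk.contains y)).contains x)
      = vk.filter (fun x => !tk.contains x) := by
    apply List.filter_congr; intro x hx; simp [List.mem_filter, hx]
  rw [h2, h3]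
  rw [foldB_train t (fun k => (PySem.Dict.mk v).contains k) 0 0 0,
      foldB_val v (fun k => (PySem.Dict.mk t).contains k) 0 0]
  simp only [hQ, hP]
  rw [PySem.List.foldl_add, PySem.List.foldl_add,
      map_getD v hv (fun k => !tk.contains k), map_getD t ht (fun k => !vk.contains k)]
  simp
  refine ⟨?_, ?_, ?_⟩
  · rw [htk, List.filter_map, List.length_map]; rfl
  · rw [htk, List.filter_map, List.length_map]; rfl
  · rw [hvk, List.filter_map, List.length_map]; rfl

-- ===== VERDICT (by name: the statement is the Claim_ definition above) =====
theorem get_topic_overlap_spec : Claim_equal_get_topic_overlap := by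
  intro t v _ hpre
  unfold Spec_get_topic_overlap
  exact main t v hpre.1 hpre.2
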